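-- pv_equiv track=rewrite | github.com/CarlosAPard0/IEEEXtreme-19-All-Problems | Visit_Egypt_50.py | precompute
-- ===== SOURCE A (Python) =====
-- MOD = 1_000_000_007
--
-- STEP = 212  # 5300 / 25
--
-- COINS = [1, 2, 4, 20, 40, 80, 200, 400, 800]
--
-- def precompute(max_n):
--     if max_n == 0:
--         return [1]
--     max_amount = STEP * max_n
--     size = 1024  # >= max coin; power of two for fast masking
--     mask = size - 1
--     buffer = [0] * size
--     buffer[0] = 1  # dp[0]
--     ways = [0] * (max_n + 1)
--     ways[0] = 1
--     coins = COINS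
--     mod = MOD
--     step = STEP
--
--     for current in range(1, max_amount + 1):
--         idx = current & mask
--         total = 0
--         for coin in coins:
--             if coin > current:
--                 break
--             total += buffer[(idx - coin) & mask]
--             if total >= mod:
--                 total -= mod
--         buffer[idx] = total
--         if current % step == 0:
--             ways[current // step] = total
--     return ways
-- ===== SOURCE B (Python) =====
-- MOD = 1_000_000_007
--
-- STEP = 212  # 5300 / 25
--
-- COINS = [1, 2, 4, 20, 40, 80, 200, 400, 800]
--
-- def precompute(max_n):
--     # Top-down memoization: an explicit work stack resolves each amount's
--     # missing sub-amounts on demand (depth-first) into a memo table with None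
--     # marking unresolved amounts, instead of A's bottom-up sweep through a
--     # circular buffer.
--     if max_n == 0:
--         return [1]
--     max_amount = STEP * max_n
--     memo = [None] * (max_amount + 1)
--     memo[0] = 1
--     stack = [max_amount]
--     while stack:
--         v = stack[-1]
--         if memo[v] is not None:
--             stack.pop()
--             continue
--         missing = [v - c for c in COINS if c <= v and memo[v - c] is None]
--         if missing:
--             stack.extend(missing)
--         else:
--             memo[v] = sum(memo[v - c] for c in COINS if c <= v) % MOD
--             stack.pop()
--     return [memo[k * STEP] for k in range(max_n + 1)]
-- ===== Notes on version B (the rewrite author's own statement) =====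
-- stated objective: alternative
-- what changed: Replaces A's bottom-up tabulation (a sweep over all amounts that pulls dp[c-coin] out of a 1024-slot circular buffer and harvests ways at multiples of STEP on the fly) by top-down memoization: an explicit work stack resolves each amount's missing sub-amounts depth-first into a dict memo, and the answers are read from the memo afterwards.
import Mathlib
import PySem

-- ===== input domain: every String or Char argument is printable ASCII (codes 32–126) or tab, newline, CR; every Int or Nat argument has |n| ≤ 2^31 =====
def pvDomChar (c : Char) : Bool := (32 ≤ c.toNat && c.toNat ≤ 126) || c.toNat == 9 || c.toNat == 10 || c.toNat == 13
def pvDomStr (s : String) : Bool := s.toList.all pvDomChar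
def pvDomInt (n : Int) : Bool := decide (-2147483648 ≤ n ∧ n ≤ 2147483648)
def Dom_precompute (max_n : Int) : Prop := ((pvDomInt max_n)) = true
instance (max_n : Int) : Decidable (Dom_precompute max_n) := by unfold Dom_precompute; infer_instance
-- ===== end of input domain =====

-- B replaces A's bottom-up tabulation through a circular 1024-slot buffer by top-down
-- memoization: an explicit work stack resolves missing sub-amounts depth-first into a
-- dict memo (objective: alternative decomposition, similar cost).

def pvM : Int := 1000000007

def pvCoins : List Int := [1, 2, 4, 20, 40, 80, 200, 400, 800]

-- ===== PORT A =====
-- Python list used as a fixed-size buffer ↔ Array Int; pvGet/pvSet are Python's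
-- buffer[i] / buffer[i] = v for the in-range, nonnegative indices A forms.
def pvGet (a : Array Int) (i : Int) : Int := a.getD i.toNat 0

def pvSet (a : Array Int) (i : Int) (v : Int) : Array Int := a.setIfInBounds i.toNat v

-- total += buffer[…]; if total >= mod: total -= mod
def pvAddStep (total x : Int) : Int :=
  if pvM ≤ total + x then total + x - pvM else total + x

-- the inner `for coin in coins: … break` loop; `(idx - coin) & mask` is PySem.Int.band _ 1023
def precomputeInner (current idx : Int) (buf : Array Int) : List Int → Int → Int
  | [], total => total
  | c :: cs, total =>
    if current < c then total   -- Python: if coin > current: break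
    else
      precomputeInner current idx buf cs
        (pvAddStep total (pvGet buf (PySem.Int.band (idx - c) 1023)))

-- one iteration of `for current in range(1, max_amount + 1)`; `current & mask` = band current 1023
def precomputeStep (st : Array Int × Array Int) (current : Int) : Array Int × Array Int :=
  let idx := PySem.Int.band current 1023
  let total := precomputeInner current idx st.1 pvCoins 0
  (pvSet st.1 idx total,
   if PySem.Int.mod current 212 = 0 then
     pvSet st.2 (PySem.Int.floordiv current 212) total
   else st.2)

def precompute (max_n : Int) : List Int :=
  if max_n = 0 then [1]
  else
    let max_amount := 212 * max_n
    let st := (PySem.List.pyRange 1 (max_amount + 1) 1).foldl precomputeStep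
      (pvSet (Array.replicate 1024 (0 : Int)) 0 1,
       pvSet (Array.replicate (max_n + 1).toNat (0 : Int)) 0 1)
    st.2.toList

-- ===== PORT B =====
-- Python list memo with None sentinels ↔ Array (Option Int); pvGetO/pvSetO are
-- memo[i] / memo[i] = x for the in-range, nonnegative indices B forms.
def pvGetO (a : Array (Option Int)) (i : Int) : Option Int := a.getD i.toNat none

def pvSetO (a : Array (Option Int)) (i : Int) (x : Option Int) : Array (Option Int) :=
  a.setIfInBounds i.toNat x

-- missing = [v - c for c in COINS if c <= v and memo[v - c] is None]
def pvMissing (memo : Array (Option Int)) (v : Int) : List Int :=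
  (pvCoins.filter (fun c => decide (c ≤ v) && (pvGetO memo (v - c)).isNone)).map (fun c => v - c)

-- memo[v] = sum(memo[v - c] for c in COINS if c <= v) % MOD; each memo[v - c] is
-- guarded by the missing-check, so getD's default is never read where this is applied
def pvMemoSum (memo : Array (Option Int)) (v : Int) : Int :=
  ((pvCoins.filter (fun c => decide (c ≤ v))).map (fun c => (pvGetO memo (v - c)).getD 0)).sum % pvM

-- the `while stack:` loop; Python's stack top stack[-1] is the Lean list head, so
-- stack.extend(missing) is missing.reverse ++ stack.  The fuel argument only makes the
-- recursion structural; precompute_alt passes enough of it (proved below).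
def pvLoopB : Nat → Array (Option Int) → List Int → Array (Option Int)
  | _, memo, [] => memo
  | 0, memo, _ :: _ => memo
  | fuel + 1, memo, v :: rest =>
    if (pvGetO memo v).isSome then pvLoopB fuel memo rest
    else
      let missing := pvMissing memo v
      if missing.isEmpty then
        pvLoopB fuel (pvSetO memo v (some (pvMemoSum memo v))) rest
      else
        pvLoopB fuel memo (missing.reverse ++ v :: rest)

def precompute_alt (max_n : Int) : List Int :=
  if max_n = 0 then [1]
  else
    let max_amount := 212 * max_n
    let memo := pvLoopB (2 * max_amount.toNat + 3)
      (pvSetO (Array.replicate (max_amount + 1).toNat (none : Option Int)) 0 (some 1))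
      [max_amount]
    -- memo[k * STEP]: the entry is always some here (proved), so getD's default is never read
    (PySem.List.pyRange 0 (max_n + 1) 1).map (fun k => (pvGetO memo (k * 212)).getD 0)

-- ===== PRECONDITION & SPEC =====
-- Pre_ excludes negative max_n, on which Python A raises IndexError (its ways list is built empty).
def Pre_precompute (max_n : Int) : Prop := 0 ≤ max_n
instance (max_n : Int) : Decidable (Pre_precompute max_n) := by unfold Pre_precompute; infer_instance
def pvWitness_precompute : Int := (2)

def Spec_precompute (max_n : Int) (out : List Int) : Prop := out = precompute_alt max_n
instance (max_n : Int) (out : List Int) : Decidable (Spec_precompute max_n out) := by unfold Spec_precompute; infer_instance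

-- ===== CLAIM (what is proved, stated in full; the proofs are below) =====
def Claim_equal_precompute : Prop := ∀ (max_n : Int), Dom_precompute max_n → Pre_precompute max_n → Spec_precompute max_n (precompute max_n)

-- ===== LEMMAS AND PROOFS =====

def pvCoinsN : List Nat := [1, 2, 4, 20, 40, 80, 200, 400, 800]

lemma pvCoins_eq_map : pvCoins = pvCoinsN.map (Nat.cast : Nat → Int) := by
  simp [pvCoins, pvCoinsN]

lemma pvCoinsN_bounds {c : Nat} (hc : c ∈ pvCoinsN) : 1 ≤ c ∧ c ≤ 800 := by
  simp [pvCoinsN] at hc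
  omega

-- reference value: number of ordered coin compositions of n, mod pvM
def pvD : Nat → Int
  | 0 => 1
  | n + 1 =>
    (((pvCoinsN.filter (fun c => c ≤ n + 1)).attach.map (fun c => pvD (n + 1 - c.1))).sum) % pvM
decreasing_by
  have hm := (List.mem_filter.mp c.2).1
  have h1 := (pvCoinsN_bounds hm).1
  omega

lemma pvD_succ (n : Nat) :
    pvD (n + 1) = (((pvCoinsN.filter (fun c => c ≤ n + 1)).map (fun c => pvD (n + 1 - c))).sum) % pvM := by
  rw [pvD]
  congr 1
  simp [List.map_subtype, List.unattach_attach]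

-- getD after a point update
lemma pv_getD_set {α : Type} (a : Array α) (i j : Nat) (v d : α) (h : i < a.size) :
    (a.setIfInBounds i v).getD j d = if i = j then v else a.getD j d := by
  rw [Array.getD_eq_getD_getElem?, Array.getD_eq_getD_getElem?, Array.getElem?_setIfInBounds]
  by_cases h1 : i = j
  · rw [if_pos h1, if_pos h, if_pos h1]
    rfl
  · rw [if_neg h1, if_neg h1]

lemma pv_getD_replicate {α : Type} (n j : Nat) (x d : α) :
    (Array.replicate n x).getD j d = if j < n then x else d := by
  rw [Array.getD_eq_getD_getElem?, Array.getElem?_replicate]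
  split_ifs with h1
  · rfl
  · rfl

lemma pvSet_natCast (a : Array Int) (k : Nat) (v : Int) :
    pvSet a ((k : Nat) : Int) v = a.setIfInBounds k v := by
  simp [pvSet]

lemma pvGet_natCast (a : Array Int) (k : Nat) : pvGet a ((k : Nat) : Int) = a.getD k 0 := by
  simp [pvGet]

lemma pv_getD_eq_getElem (a : Array Int) (i : Nat) (h : i < a.size) : a.getD i 0 = a[i] := by
  rw [Array.getD_eq_getD_getElem?, Array.getElem?_eq_getElem h]
  rfl

lemma pvD_bounds (n : Nat) : 0 ≤ pvD n ∧ pvD n < pvM := by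
  cases n with
  | zero => simp [pvD, pvM]
  | succ m =>
    rw [pvD]
    constructor
    · exact Int.emod_nonneg _ (by norm_num [pvM])
    · exact Int.emod_lt_of_pos _ (by norm_num [pvM])

def pvRef (n : Nat) : List Int := (List.range (n + 1)).map (fun k => pvD (212 * k))

-- x & 1023 = x % 1024 for every x ≥ -1024 (all indices the ports form)
lemma pv_band_1023 (x : Int) (hx : -1024 ≤ x) : PySem.Int.band x 1023 = x % 1024 := by
  have h1023 : Int.toNat 1023 = 1023 := rfl
  have hpow : (1023 : Nat) = 2 ^ 10 - 1 := by norm_num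
  rcases le_or_gt 0 x with hx2 | hx2
  · rw [PySem.Int.band_of_nonneg hx2 (by norm_num)]
    rw [h1023, hpow, Nat.and_two_pow_sub_one_eq_mod]
    omega
  · unfold PySem.Int.band
    rw [if_neg (by omega), if_pos (by norm_num)]
    rw [h1023, Nat.and_comm, hpow, Nat.and_two_pow_sub_one_eq_mod,
      Nat.mod_eq_of_lt (by omega)]
    omega

-- the incremental `if total >= mod: total -= mod` loop computes a sum mod pvM
lemma pv_foldl_addStep (ds : List Int) :
    ∀ a : Int, 0 ≤ a → a < pvM → (∀ d ∈ ds, 0 ≤ d ∧ d < pvM) →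
      ds.foldl pvAddStep a = (a + ds.sum) % pvM := by
  induction ds with
  | nil => intro a h0 h1 _; simp [Int.emod_eq_of_lt h0 h1]
  | cons d ds ih =>
    intro a h0 h1 hds
    have hd := hds d (by simp)
    have hstep : pvAddStep a d = (a + d) % pvM := by
      unfold pvAddStep
      split_ifs with h
      · rw [← Int.sub_emod_right (a + d) pvM, Int.emod_eq_of_lt (by omega) (by omega)]
      · rw [Int.emod_eq_of_lt (by omega) (by omega)]
    have hb : 0 ≤ pvAddStep a d ∧ pvAddStep a d < pvM := by
      unfold pvAddStep; split_ifs with h <;> constructor <;> omega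
    rw [List.foldl_cons, ih _ hb.1 hb.2 (fun e he => hds e (by simp [he])), hstep,
      List.sum_cons, Int.emod_add_emod]
    ring_nf

-- the break in A's inner loop is a filter, because pvCoins is sorted
lemma pv_inner_eq_foldl (current idx : Int) (buf : Array Int) :
    ∀ (cs : List Int), cs.Pairwise (· ≤ ·) → ∀ total,
      precomputeInner current idx buf cs total =
        ((cs.filter (fun c => decide (c ≤ current))).map
          (fun c => pvGet buf (PySem.Int.band (idx - c) 1023))).foldl pvAddStep total := by
  intro cs
  induction cs with
  | nil => intro _ total; simp [precomputeInner]
  | cons c cs ih =>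
    intro hp total
    rw [List.pairwise_cons] at hp
    unfold precomputeInner
    by_cases h : current < c
    · rw [if_pos h]
      have hf : (c :: cs).filter (fun c => decide (c ≤ current)) = [] := by
        rw [List.filter_eq_nil_iff]
        intro x hx
        rcases (List.mem_cons.mp hx) with rfl | hx2
        · simpa using h
        · have := hp.1 x hx2; simp; omega
      rw [hf]; rfl
    · rw [if_neg h, ih hp.2]
      have hf : (c :: cs).filter (fun c => decide (c ≤ current)) =
          c :: cs.filter (fun c => decide (c ≤ current)) := by
        rw [List.filter_cons_of_pos (by simp; omega)]
      rw [hf, List.map_cons, List.foldl_cons]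

def BufInv (t : Nat) (buf : Array Int) : Prop :=
  buf.size = 1024 ∧ ∀ j : Nat, j ≤ t → t < j + 1024 → buf.getD (j % 1024) 0 = pvD j

def WaysInv (n t : Nat) (ways : Array Int) : Prop :=
  ways.size = n + 1 ∧ ∀ k : Nat, k ≤ n →
    ways.getD k 0 = if 212 * k ≤ t then pvD (212 * k) else 0

lemma pv_inner_total (t : Nat) (buf : Array Int) (hb : BufInv t buf) :
    precomputeInner ((t : Int) + 1) (PySem.Int.band ((t : Int) + 1) 1023) buf pvCoins 0 = pvD (t + 1) := by
  rw [pv_inner_eq_foldl _ _ _ pvCoins (by decide) 0]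
  rw [pvCoins_eq_map, List.filter_map, List.map_map]
  simp only [Function.comp_def]
  have hfc : List.filter (fun c : Nat => decide ((c : Int) ≤ (t : Int) + 1)) pvCoinsN =
      List.filter (fun c : Nat => decide (c ≤ t + 1)) pvCoinsN := by
    apply List.filter_congr
    intro x _
    apply decide_eq_decide.mpr
    omega
  rw [hfc]
  have hidx : PySem.Int.band ((t : Int) + 1) 1023 = ((t : Int) + 1) % 1024 :=
    pv_band_1023 _ (by omega)
  have hmap : List.map
      (fun c : Nat => pvGet buf (PySem.Int.band (PySem.Int.band ((t : Int) + 1) 1023 - (c : Int)) 1023))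
      (List.filter (fun c : Nat => decide (c ≤ t + 1)) pvCoinsN) =
      List.map (fun c : Nat => pvD (t + 1 - c)) (List.filter (fun c : Nat => decide (c ≤ t + 1)) pvCoinsN) := by
    apply List.map_congr_left
    intro cN hcN
    have hmem : cN ∈ pvCoinsN := List.mem_of_mem_filter hcN
    have hle : cN ≤ t + 1 := by simpa using List.of_mem_filter hcN
    have hbd := pvCoinsN_bounds hmem
    rw [hidx]
    rw [pv_band_1023 _ (by
      have := Int.emod_nonneg ((t : Int) + 1) (by norm_num : (1024 : Int) ≠ 0)
      omega)]
    have hix : (((t : Int) + 1) % 1024 - (cN : Int)) % 1024 = (((t + 1 - cN) % 1024 : Nat) : Int) := by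
      omega
    rw [hix, pvGet_natCast]
    exact hb.2 (t + 1 - cN) (by omega) (by omega)
  rw [hmap]
  rw [pv_foldl_addStep _ 0 le_rfl (by norm_num [pvM]) (by
    intro d hd
    rcases List.mem_map.mp hd with ⟨c, _, rfl⟩
    exact pvD_bounds _)]
  rw [zero_add, ← pvD_succ]

lemma pv_stepA (n t : Nat) (st : Array Int × Array Int) (ht : t + 1 ≤ 212 * n)
    (hb : BufInv t st.1) (hw : WaysInv n t st.2) :
    BufInv (t + 1) (precomputeStep st ((t : Int) + 1)).1 ∧
      WaysInv n (t + 1) (precomputeStep st ((t : Int) + 1)).2 := by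
  obtain ⟨hbl, hbv⟩ := hb
  obtain ⟨hwl, hwv⟩ := hw
  have htot : precomputeInner ((t : Int) + 1) (PySem.Int.band ((t : Int) + 1) 1023) st.1 pvCoins 0 = pvD (t + 1) :=
    pv_inner_total t st.1 ⟨hbl, hbv⟩
  have hidx : PySem.Int.band ((t : Int) + 1) 1023 = (((t + 1) % 1024 : Nat) : Int) := by
    rw [pv_band_1023 _ (by omega)]; omega
  have hmod : PySem.Int.mod ((t : Int) + 1) 212 = ((t : Int) + 1) % 212 :=
    PySem.Int.mod_eq_emod_of_pos (by norm_num)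
  constructor
  · show BufInv (t + 1) (pvSet st.1 (PySem.Int.band ((t : Int) + 1) 1023) _)
    rw [hidx, pvSet_natCast]
    have htot2 : precomputeInner ((t : Int) + 1) ((((t + 1) % 1024 : Nat) : Int)) st.1 pvCoins 0 = pvD (t + 1) := by
      rw [← hidx]; exact htot
    rw [htot2]
    constructor
    · rw [Array.size_setIfInBounds, hbl]
    · intro j hj1 hj2
      rw [pv_getD_set _ _ _ _ _ (by rw [hbl]; omega)]
      by_cases hjt : j = t + 1
      · rw [if_pos (by omega)]
        rw [hjt]
      · rw [if_neg (by omega)]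
        exact hbv j (by omega) (by omega)
  · show WaysInv n (t + 1)
      (if PySem.Int.mod ((t : Int) + 1) 212 = 0 then
        pvSet st.2 (PySem.Int.floordiv ((t : Int) + 1) 212) _
      else st.2)
    by_cases hc : (t + 1) % 212 = 0
    · rw [if_pos (by rw [hmod]; omega)]
      have hdiv : PySem.Int.floordiv ((t : Int) + 1) 212 = (((t + 1) / 212 : Nat) : Int) := by
        rw [PySem.Int.floordiv_eq_ediv_of_pos (by norm_num)]; omega
      rw [hdiv, pvSet_natCast, htot]
      constructor
      · rw [Array.size_setIfInBounds, hwl]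
      · intro k hk
        rw [pv_getD_set _ _ _ _ _ (by rw [hwl]; omega)]
        by_cases hkk : (t + 1) / 212 = k
        · rw [if_pos hkk, if_pos (show 212 * k ≤ t + 1 by omega)]
          congr 1
          omega
        · rw [if_neg hkk, hwv k hk]
          by_cases h1 : 212 * k ≤ t
          · rw [if_pos h1, if_pos (show 212 * k ≤ t + 1 by omega)]
          · rw [if_neg h1, if_neg (show ¬ 212 * k ≤ t + 1 by omega)]
    · rw [if_neg (by rw [hmod]; omega)]
      constructor
      · exact hwl
      · intro k hk
        rw [hwv k hk]
        by_cases h1 : 212 * k ≤ t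
        · rw [if_pos h1, if_pos (show 212 * k ≤ t + 1 by omega)]
        · rw [if_neg h1, if_neg (show ¬ 212 * k ≤ t + 1 by omega)]

lemma pv_loopA (n : Nat) : ∀ t : Nat, t ≤ 212 * n →
    BufInv t (((PySem.List.pyRange 1 ((t : Int) + 1) 1).foldl precomputeStep
      ((Array.replicate 1024 (0 : Int)).setIfInBounds 0 1,
       (Array.replicate (n + 1) (0 : Int)).setIfInBounds 0 1)).1) ∧
    WaysInv n t (((PySem.List.pyRange 1 ((t : Int) + 1) 1).foldl precomputeStep
      ((Array.replicate 1024 (0 : Int)).setIfInBounds 0 1,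
       (Array.replicate (n + 1) (0 : Int)).setIfInBounds 0 1)).2) := by
  intro t
  induction t with
  | zero =>
    intro _
    rw [show ((0 : Nat) : Int) + 1 = 1 by norm_num, PySem.List.pyRange_one_eq_nil le_rfl, List.foldl_nil]
    constructor
    · constructor
      · rw [Array.size_setIfInBounds, Array.size_replicate]
      · intro j hj1 _
        interval_cases j
        rw [pv_getD_set _ _ _ _ _ (by rw [Array.size_replicate]; norm_num)]
        rw [if_pos rfl]
        simp [pvD]
    · constructor
      · rw [Array.size_setIfInBounds, Array.size_replicate]
      · intro k hk
        rw [pv_getD_set _ _ _ _ _ (by rw [Array.size_replicate]; omega)]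
        by_cases hk0 : k = 0
        · subst hk0
          rw [if_pos rfl, if_pos (by omega)]
          simp [pvD]
        · rw [if_neg (by omega), if_neg (by omega), pv_getD_replicate]
          rw [if_pos (by omega)]
  | succ t ih =>
    intro ht
    have hsplit : PySem.List.pyRange 1 (((t + 1 : Nat) : Int) + 1) 1 =
        PySem.List.pyRange 1 ((t : Int) + 1) 1 ++ [(t : Int) + 1] := by
      have : (((t + 1 : Nat) : Int) + 1) = ((t : Int) + 1) + 1 := by push_cast; ring
      rw [this, PySem.List.pyRange_one_succ_right (by omega)]
    rw [hsplit, List.foldl_append, List.foldl_cons, List.foldl_nil]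
    exact pv_stepA n t _ (by omega) (ih (by omega)).1 (ih (by omega)).2

lemma pv_A_eq (n : Nat) (hn : 1 ≤ n) : precompute (n : Int) = pvRef n := by
  unfold precompute
  dsimp only
  rw [if_neg (by omega)]
  have hinit1 : pvSet (Array.replicate 1024 (0 : Int)) 0 1 =
      (Array.replicate 1024 (0 : Int)).setIfInBounds 0 1 := by
    simp [pvSet]
  have hinit2 : pvSet (Array.replicate ((n : Int) + 1).toNat (0 : Int)) 0 1 =
      (Array.replicate (n + 1) (0 : Int)).setIfInBounds 0 1 := by
    rw [show ((n : Int) + 1).toNat = n + 1 by omega]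
    simp [pvSet]
  have hrange : 212 * (n : Int) + 1 = ((212 * n : Nat) : Int) + 1 := by push_cast; ring
  rw [hinit1, hinit2, hrange]
  have hw := (pv_loopA n (212 * n) le_rfl).2
  obtain ⟨hwl, hwv⟩ := hw
  apply List.ext_getElem
  · rw [Array.length_toList, hwl]
    simp [pvRef]
  · intro i h1 h2
    rw [Array.length_toList, hwl] at h1
    rw [Array.getElem_toList, ← pv_getD_eq_getElem _ _ (by omega), hwv i (by omega)]
    rw [if_pos (by omega)]
    simp [pvRef]

-- ===== B-side lemmas =====

-- the memo after t amounts have been resolved: some (pvD j) below t, none above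
def MemoInv (N t : Nat) (memo : Array (Option Int)) : Prop :=
  memo.size = N + 1 ∧ ∀ j : Nat, j ≤ N →
    memo.getD j none = if j ≤ t then some (pvD j) else none

lemma pvGetO_inv (N t : Nat) (memo : Array (Option Int)) (h : MemoInv N t memo)
    (x : Int) (h0 : 0 ≤ x) (h1 : x ≤ (N : Int)) :
    pvGetO memo x = if x ≤ (t : Int) then some (pvD x.toNat) else none := by
  have hx : pvGetO memo x = memo.getD x.toNat none := by simp [pvGetO]
  rw [hx, h.2 x.toNat (by omega)]
  by_cases h2 : x ≤ (t : Int)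
  · rw [if_pos (by omega), if_pos h2]
  · rw [if_neg (by omega), if_neg h2]

-- the computed sum is the recurrence value
lemma pvMemoSum_eq (N t : Nat) (memo : Array (Option Int)) (h : MemoInv N t memo)
    (htN : t + 1 ≤ N) : pvMemoSum memo ((t : Int) + 1) = pvD (t + 1) := by
  unfold pvMemoSum
  rw [pvCoins_eq_map, List.filter_map, List.map_map]
  simp only [Function.comp_def]
  have hfc : List.filter (fun c : Nat => decide ((c : Int) ≤ (t : Int) + 1)) pvCoinsN =
      List.filter (fun c : Nat => decide (c ≤ t + 1)) pvCoinsN := by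
    apply List.filter_congr
    intro x _
    apply decide_eq_decide.mpr
    omega
  rw [hfc]
  have hmap : List.map (fun c : Nat => (pvGetO memo ((t : Int) + 1 - (c : Int))).getD 0)
      (List.filter (fun c : Nat => decide (c ≤ t + 1)) pvCoinsN) =
      List.map (fun c : Nat => pvD (t + 1 - c)) (List.filter (fun c : Nat => decide (c ≤ t + 1)) pvCoinsN) := by
    apply List.map_congr_left
    intro cN hcN
    have hbd := pvCoinsN_bounds (List.mem_of_mem_filter hcN)
    have hle : cN ≤ t + 1 := by simpa using List.of_mem_filter hcN
    rw [pvGetO_inv N t memo h _ (by omega) (by omega), if_pos (by omega)]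
    simp only [Option.getD_some]
    congr 1
    omega
  rw [hmap, ← pvD_succ]

-- resolving amount t + 1 advances the memo invariant
lemma pvMemoSet_inv (N t : Nat) (memo : Array (Option Int)) (h : MemoInv N t memo)
    (htN : t + 1 ≤ N) :
    MemoInv N (t + 1) (pvSetO memo ((t : Int) + 1) (some (pvD (t + 1)))) := by
  have hset : pvSetO memo ((t : Int) + 1) (some (pvD (t + 1))) =
      memo.setIfInBounds (t + 1) (some (pvD (t + 1))) := by
    rw [pvSetO, show ((t : Int) + 1).toNat = t + 1 by omega]
  rw [hset]
  constructor
  · rw [Array.size_setIfInBounds, h.1]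
  · intro j hj
    rw [pv_getD_set _ _ _ _ _ (by rw [h.1]; omega)]
    by_cases hjt : t + 1 = j
    · rw [if_pos hjt, if_pos (by omega), ← hjt]
    · rw [if_neg hjt, h.2 j hj]
      by_cases h1 : j ≤ t
      · rw [if_pos h1, if_pos (by omega)]
      · rw [if_neg h1, if_neg (by omega)]

-- a strictly increasing Int list inside (a, b] has at most b - a elements
lemma pv_len_le (l : List Int) : ∀ (a b : Int), a ≤ b → l.Pairwise (· < ·) →
    (∀ x ∈ l, a < x ∧ x ≤ b) → (l.length : Int) ≤ b - a := by
  induction l with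
  | nil =>
    intro a b hab _ _
    simpa using hab
  | cons x l ih =>
    intro a b hab hp hm
    rw [List.pairwise_cons] at hp
    have hx := hm x (by simp)
    have := ih x b hx.2 hp.2 (fun y hy => ⟨hp.1 y hy, (hm y (by simp [hy])).2⟩)
    simp only [List.length_cons]
    push_cast
    omega

-- main invariant of the work-stack loop
lemma pvLoopB_inv (N : Nat) : ∀ (fuel t : Nat) (memo : Array (Option Int)) (stack : List Int),
    MemoInv N t memo →
    t ≤ N →
    stack.Pairwise (· < ·) →
    (∀ v ∈ stack, 0 ≤ v ∧ v ≤ (N : Int)) →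
    (t = N ∨ ((N : Int)) ∈ stack) →
    2 * (N - t) + stack.length < fuel + 2 * (stack.filter (fun v => decide ((t : Int) < v))).length →
    MemoInv N N (pvLoopB fuel memo stack) := by
  intro fuel
  induction fuel with
  | zero =>
    intro t memo stack hm htN hp hb hN hΦ
    cases stack with
    | nil =>
      rcases hN with h | h
      · subst h
        simpa [pvLoopB] using hm
      · cases h
    | cons v rest =>
      exfalso
      have hlen := pv_len_le ((v :: rest).filter (fun v => decide ((t : Int) < v))) (t : Int) (N : Int)
        (by omega) (hp.filter _) (by
          intro x hx
          have h1 := List.of_mem_filter hx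
          have h2 := hb x (List.mem_of_mem_filter hx)
          simp at h1
          exact ⟨h1, h2.2⟩)
      omega
  | succ fuel ih =>
    intro t memo stack hm htN hp hb hN hΦ
    cases stack with
    | nil =>
      rcases hN with h | h
      · subst h
        simpa [pvLoopB] using hm
      · cases h
    | cons v rest =>
      rw [List.pairwise_cons] at hp
      have hvb := hb v (by simp)
      have hget := pvGetO_inv N t memo hm v hvb.1 hvb.2
      show MemoInv N N (if (pvGetO memo v).isSome then pvLoopB fuel memo rest else _)
      by_cases hvt : v ≤ (t : Int)
      · -- pop: v already memoised
        rw [hget, if_pos hvt]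
        simp only [Option.isSome_some, if_true]
        apply ih t memo rest hm htN hp.2 (fun y hy => hb y (by simp [hy]))
        · rcases hN with h | h
          · exact Or.inl h
          · rcases List.mem_cons.mp h with h2 | h2
            · exact Or.inl (by omega)
            · exact Or.inr h2
        · have hf : (v :: rest).filter (fun v => decide ((t : Int) < v)) =
              rest.filter (fun v => decide ((t : Int) < v)) :=
            List.filter_cons_of_neg (by simp; omega)
          rw [hf] at hΦ
          simp only [List.length_cons] at hΦ
          omega
      · rw [hget, if_neg hvt]
        simp only [Option.isSome_none, Bool.false_eq_true, if_false]
        have hvt' : (t : Int) < v := by omega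
        have hrest_gt : ∀ y ∈ rest, v < y := hp.1
        by_cases hveq : v = (t : Int) + 1
        · -- compute: all sub-amounts resolved
          subst hveq
          have ht1N : t + 1 ≤ N := by omega
          have hmiss : pvMissing memo ((t : Int) + 1) = [] := by
            unfold pvMissing
            rw [List.filter_eq_nil_iff.mpr, List.map_nil]
            intro c hc
            rw [pvCoins_eq_map] at hc
            rcases List.mem_map.mp hc with ⟨cN, hcN, rfl⟩
            have hbd := pvCoinsN_bounds hcN
            intro hcontra
            simp only [Bool.and_eq_true, decide_eq_true_eq, Option.isNone_iff_eq_none] at hcontra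
            obtain ⟨hle, hnone⟩ := hcontra
            rw [pvGetO_inv N t memo hm _ (by omega) (by omega), if_pos (by omega)] at hnone
            cases hnone
          simp only [hmiss, List.isEmpty_nil, if_pos]
          rw [pvMemoSum_eq N t memo hm ht1N]
          apply ih (t + 1) _ rest (pvMemoSet_inv N t memo hm ht1N) ht1N hp.2
            (fun y hy => hb y (by simp [hy]))
          · rcases hN with h | h
            · omega
            · rcases List.mem_cons.mp h with h2 | h2
              · exact Or.inl (by omega)
              · exact Or.inr h2
          · -- every rest entry exceeds t + 1
            have hf1 : rest.filter (fun v => decide (((t + 1 : Nat) : Int) < v)) = rest :=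
              List.filter_eq_self.mpr (fun y hy => by
                have := hrest_gt y hy; simp; omega)
            have hf2 : (((t : Int) + 1) :: rest).filter (fun v => decide ((t : Int) < v)) =
                ((t : Int) + 1) :: rest.filter (fun v => decide ((t : Int) < v)) :=
              List.filter_cons_of_pos (by simp)
            have hf3 : rest.filter (fun v => decide ((t : Int) < v)) = rest :=
              List.filter_eq_self.mpr (fun y hy => by
                have := hrest_gt y hy; simp; omega)
            rw [hf2, hf3] at hΦ
            rw [hf1]
            simp only [List.length_cons] at hΦ ⊢
            omega
        · -- push: at least v - 1 is missing
          have hvt2 : (t : Int) + 1 < v := by omega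
          set missing := pvMissing memo v with hmissdef
          have hmem_missing : ∀ m ∈ missing, (t : Int) < m ∧ m < v := by
            intro m hm2
            rw [hmissdef] at hm2
            unfold pvMissing at hm2
            rcases List.mem_map.mp hm2 with ⟨c, hc, rfl⟩
            have hcf := List.of_mem_filter hc
            have hcm := List.mem_of_mem_filter hc
            rw [pvCoins_eq_map] at hcm
            rcases List.mem_map.mp hcm with ⟨cN, hcN, rfl⟩
            have hbd := pvCoinsN_bounds hcN
            simp only [Bool.and_eq_true, decide_eq_true_eq, Option.isNone_iff_eq_none] at hcf
            obtain ⟨hle, hnone⟩ := hcf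
            rw [pvGetO_inv N t memo hm _ (by omega) (by omega)] at hnone
            by_cases hgt : v - (cN : Int) ≤ (t : Int)
            · rw [if_pos hgt] at hnone
              cases hnone
            · constructor <;> omega
          have hone : (v - 1) ∈ missing := by
            rw [hmissdef]
            unfold pvMissing
            apply List.mem_map.mpr
            refine ⟨1, ?_, rfl⟩
            apply List.mem_filter.mpr
            refine ⟨by simp [pvCoins], ?_⟩
            rw [pvGetO_inv N t memo hm _ (by omega) (by omega), if_neg (by omega)]
            simp only [Option.isNone_none, Bool.and_true, decide_eq_true_eq]
            omega
          have hne : missing.isEmpty = false := by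
            have h0 : 0 < missing.length := List.length_pos_of_mem hone
            cases hmm : missing.isEmpty
            · rfl
            · rw [List.isEmpty_iff.mp hmm] at h0
              cases h0
          simp only [hne, Bool.false_eq_true, if_false]
          -- pairwise decreasing missing (coins strictly increase)
          have hmiss_pair : missing.Pairwise (· > ·) := by
            rw [hmissdef]
            unfold pvMissing
            apply List.pairwise_map.mpr
            exact (((by decide : pvCoins.Pairwise (· < ·)).filter _).imp (fun hab => by omega))
          have hpair' : (missing.reverse ++ v :: rest).Pairwise (· < ·) := by
            apply List.pairwise_append.mpr
            refine ⟨?_, List.pairwise_cons.mpr ⟨hrest_gt, hp.2⟩, ?_⟩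
            · rw [List.pairwise_reverse]
              exact hmiss_pair.imp (fun h => h)
            · intro x hx y hy
              have hxm := hmem_missing x (List.mem_reverse.mp hx)
              rcases List.mem_cons.mp hy with rfl | hy2
              · omega
              · have := hrest_gt y hy2; omega
          apply ih t memo (missing.reverse ++ v :: rest) hm htN hpair'
          · intro y hy
            rcases List.mem_append.mp hy with h2 | h2
            · have := hmem_missing y (List.mem_reverse.mp h2)
              omega
            · exact hb y (by simp [List.mem_cons.mp h2])
          · rcases hN with h | h
            · exact Or.inl h
            · exact Or.inr (List.mem_append.mpr (Or.inr h))
          · -- Φ decreases: each missing entry is new and counted by the filter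
            have hfm : missing.reverse.filter (fun w => decide ((t : Int) < w)) = missing.reverse := by
              apply List.filter_eq_self.mpr
              intro y hy
              have := hmem_missing y (List.mem_reverse.mp hy)
              simp
              omega
            rw [List.filter_append, hfm]
            have hk : 1 ≤ missing.length := List.length_pos_of_mem hone
            simp only [List.length_append, List.length_reverse, List.length_cons] at hΦ ⊢
            omega
  -- (end pvLoopB_inv)

lemma pv_B_eq (n : Nat) (hn : 1 ≤ n) : precompute_alt (n : Int) = pvRef n := by
  unfold precompute_alt
  dsimp only
  rw [if_neg (by omega)]
  have hN : (212 * (n : Int)) = ((212 * n : Nat) : Int) := by push_cast; ring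
  rw [hN, Int.toNat_natCast]
  have hm0 : MemoInv (212 * n) 0
      (pvSetO (Array.replicate (((212 * n : Nat) : Int) + 1).toNat (none : Option Int)) 0 (some 1)) := by
    have hsz : (((212 * n : Nat) : Int) + 1).toNat = 212 * n + 1 := by omega
    rw [pvSetO, hsz, show (0 : Int).toNat = 0 from rfl]
    constructor
    · rw [Array.size_setIfInBounds, Array.size_replicate]
    · intro j hj
      rw [pv_getD_set _ _ _ _ _ (by rw [Array.size_replicate]; omega)]
      by_cases hj0 : j = 0
      · subst hj0
        rw [if_pos rfl, if_pos (by omega)]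
        simp [pvD]
      · rw [if_neg (by omega), if_neg (by omega), pv_getD_replicate, if_pos (by omega)]
  have hloop := pvLoopB_inv (212 * n) (2 * (212 * n) + 3) 0 _ [((212 * n : Nat) : Int)]
    hm0 (by omega) (by simp) (by simp) (Or.inr (by simp)) (by
      have : ([((212 * n : Nat) : Int)].filter (fun v => decide (((0 : Nat) : Int) < v))) =
          [((212 * n : Nat) : Int)] := by
        simp
        omega
      rw [this]
      simp)
  apply List.ext_getElem
  · rw [List.length_map, PySem.List.length_pyRange_one]
    simp [pvRef]
  · intro i h1 h2
    have hi : i < n + 1 := by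
      rw [List.length_map, PySem.List.length_pyRange_one] at h1
      omega
    rw [List.getElem_map, PySem.List.getElem_pyRange_one, zero_add]
    rw [pvGetO_inv (212 * n) (212 * n) _ hloop ((i : Int) * 212) (by positivity)
      (by push_cast; nlinarith), if_pos (by push_cast; nlinarith)]
    simp only [Option.getD_some, pvRef, List.getElem_map, List.getElem_range]
    congr 1
    omega

-- ===== VERDICT (by name: the statement is the Claim_ definition above) =====
theorem precompute_spec : Claim_equal_precompute := by
  intro max_n _ hpre
  unfold Spec_precompute
  rcases Int.eq_ofNat_of_zero_le hpre with ⟨n, rfl⟩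
  rcases Nat.eq_zero_or_pos n with rfl | hn
  · rfl
  · rw [pv_A_eq n hn, pv_B_eq n hn]
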